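-- pv_equiv track=rewrite | github.com/z/weechat-challengeauth | challengeauth.py | quakenet_lowercase
-- ===== SOURCE A (Python) =====
-- def quakenet_lowercase(string):
--     lowercase_string = string
--
--     # was specified https://www.quakenet.org/development/challengeauth
--     lower_symbols = {
--         '[': '{',
--         ']': '}',
--     }
--
--     for i, j in lower_symbols.items():
--         lowercase_string = lowercase_string.replace(i, j)
--
--     return lowercase_string
-- ===== SOURCE B (Python) =====
-- def quakenet_lowercase(string):
--     # single character-level pass with a lookup table (A does two whole-string replace passes)
--     lower_symbols = {
--         '[': '{',
--         ']': '}',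
--     }
--     return ''.join(lower_symbols.get(c, c) for c in string)
-- ===== Notes on version B (the rewrite author's own statement) =====
-- stated objective: idiomatic
-- what changed: Replaced A's two sequential whole-string str.replace passes (one per dict entry) with a single character-level traversal that maps each character through the lookup table and joins the result.
import Mathlib
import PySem

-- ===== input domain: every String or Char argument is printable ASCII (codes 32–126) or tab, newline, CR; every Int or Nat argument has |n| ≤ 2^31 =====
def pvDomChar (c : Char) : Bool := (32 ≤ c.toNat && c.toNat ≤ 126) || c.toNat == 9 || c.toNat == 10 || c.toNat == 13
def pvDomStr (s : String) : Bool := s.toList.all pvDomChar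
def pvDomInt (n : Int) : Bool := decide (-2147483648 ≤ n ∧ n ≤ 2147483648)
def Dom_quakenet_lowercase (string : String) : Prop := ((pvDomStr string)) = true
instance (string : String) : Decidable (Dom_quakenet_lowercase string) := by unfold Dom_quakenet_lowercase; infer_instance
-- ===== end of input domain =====

-- B replaces A's two whole-string str.replace passes with one character-level pass through a lookup table (idiomatic).

-- ===== PORT A =====
-- for i, j in lower_symbols.items(): lowercase_string = lowercase_string.replace(i, j)
def quakenet_lowercase (string : String) : String :=
  let lower_symbols : PySem.Dict String String :=
    (PySem.Dict.empty.insert "[" "{").insert "]" "}"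
  lower_symbols.items.foldl (fun s p => PySem.Str.replace s p.1 p.2) string

-- ===== PORT B =====
-- ''.join(lower_symbols.get(c, c) for c in string)
def quakenet_lowercase_alt (string : String) : String :=
  let lower_symbols : PySem.Dict Char Char :=
    (PySem.Dict.empty.insert '[' '{').insert ']' '}'
  String.ofList (string.toList.map (fun c => lower_symbols.getD c c))

-- ===== PRECONDITION & SPEC =====
def Spec_quakenet_lowercase (string : String) (out : String) : Prop := out = quakenet_lowercase_alt string
instance (string : String) (out : String) : Decidable (Spec_quakenet_lowercase string out) := by unfold Spec_quakenet_lowercase; infer_instance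

-- ===== CLAIM (what is proved, stated in full; the proofs are below) =====
def Claim_equal_quakenet_lowercase : Prop := ∀ (string : String), Dom_quakenet_lowercase string → Spec_quakenet_lowercase string (quakenet_lowercase string)

-- ===== LEMMAS AND PROOFS =====
theorem go_single (a b : Char) (cs : List Char) : ∀ (fuel : Nat) (acc : List Char), cs.length ≤ fuel →
    PySem.Chars.replace.go [a] [b] fuel cs acc = acc.reverse ++ cs.map (fun c => if c = a then b else c) := by
  induction cs with
  | nil => intro fuel acc h
           cases fuel <;> simp [PySem.Chars.replace.go]
  | cons c t ih =>
      intro fuel acc h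
      cases fuel with
      | zero => simp at h
      | succ n =>
        unfold PySem.Chars.replace.go
        simp only [List.length_cons] at h
        by_cases hc : c = a
        · subst hc
          rw [if_pos (by simp [List.isPrefixOf])]
          simp only [List.length_singleton, List.drop_succ_cons, List.drop_zero, List.reverse_singleton]
          rw [ih n _ (by omega)]
          simp
        · rw [if_neg (by simp [List.isPrefixOf]; exact fun h' => hc h'.symm), ih n _ (by omega)]
          simp [hc]

theorem replace_single (a b : Char) (cs : List Char) :
    PySem.Chars.replace cs [a] [b] = cs.map (fun c => if c = a then b else c) := by
  unfold PySem.Chars.replace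
  simp [go_single a b cs cs.length [] le_rfl]

-- ===== VERDICT (by name: the statement is the Claim_ definition above) =====
theorem quakenet_lowercase_spec : Claim_equal_quakenet_lowercase := by
  intro s _
  unfold Spec_quakenet_lowercase quakenet_lowercase quakenet_lowercase_alt
  show PySem.Str.replace (PySem.Str.replace s "[" "{") "]" "}" = _
  apply String.toList_injective
  simp only [PySem.Str.toList_replace, String.toList_ofList]
  rw [show ("[" : String).toList = ['['] from rfl, show ("{" : String).toList = ['{'] from rfl,
     show ("]" : String).toList = [']'] from rfl, show ("}" : String).toList = ['}'] from rfl]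
  rw [replace_single, replace_single, List.map_map]
  refine List.map_congr_left (fun c _ => ?_)
  simp only [Function.comp, PySem.Dict.getD_insert]
  by_cases h1 : c = '[' <;> by_cases h2 : c = ']' <;> simp [h1, h2]
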